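-- pv_equiv track=rewrite | github.com/mnem0nic7/congressional_repo | sorting_comparison/algorithms/bubble_sort.py | bubble_sort_verbose
-- ===== SOURCE A (Python) =====
-- from typing import List
--
-- def bubble_sort_verbose(arr: List[int]) -> tuple:
--     """
--     Bubble Sort with detailed statistics for analysis.
--
--     Args:
--         arr: List of integers to be sorted
--
--     Returns:
--         tuple: (sorted_array, comparisons_count, swaps_count, passes_count)
--     """
--     result = arr.copy()
--     n = len(result)
--     comparisons = 0
--     swaps = 0
--     passes = 0
--
--     for i in range(n):
--         swapped = False
--         passes += 1
--
--         for j in range(0, n - i - 1):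
--             comparisons += 1
--             if result[j] > result[j + 1]:
--                 result[j], result[j + 1] = result[j + 1], result[j]
--                 swaps += 1
--                 swapped = True
--
--         if not swapped:
--             break
--
--     return result, comparisons, swaps, passes
-- ===== SOURCE B (Python) =====
-- from typing import List
--
-- def _sweep(xs: List[int]) -> tuple:
--     """One bubble pass over nonempty xs: rebuild the body while carrying the running
--     maximum; returns (body, carried_max, swaps_in_pass); body + [carried_max] is the
--     list after the pass."""
--     out = []
--     swaps = 0
--     cur = xs[0]
--     for x in xs[1:]:
--         if cur > x:
--             out.append(x)
--             swaps += 1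
--         else:
--             out.append(cur)
--             cur = x
--     return out, cur, swaps
--
-- def bubble_sort_verbose(arr: List[int]) -> tuple:
--     prefix = list(arr)
--     done = []
--     comparisons = 0
--     swaps = 0
--     passes = 0
--     while prefix:
--         passes += 1
--         comparisons += len(prefix) - 1
--         body, top, s = _sweep(prefix)
--         swaps += s
--         if s == 0:
--             prefix = body + [top]
--             break
--         prefix = body
--         done.insert(0, top)
--     return prefix + done, comparisons, swaps, passes
-- ===== Notes on version B (the rewrite author's own statement) =====
-- stated objective: alternative
-- what changed: Replaces A's in-place nested index loops (swapping result[j], result[j+1] inside range-based for loops with a break flag) by a purely functional decomposition: a one-pass sweep that rebuilds the list while carrying the running maximum, driven by a while loop that maintains an explicit sorted-suffix accumulator and shrinks the working prefix each pass.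
import Mathlib
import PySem

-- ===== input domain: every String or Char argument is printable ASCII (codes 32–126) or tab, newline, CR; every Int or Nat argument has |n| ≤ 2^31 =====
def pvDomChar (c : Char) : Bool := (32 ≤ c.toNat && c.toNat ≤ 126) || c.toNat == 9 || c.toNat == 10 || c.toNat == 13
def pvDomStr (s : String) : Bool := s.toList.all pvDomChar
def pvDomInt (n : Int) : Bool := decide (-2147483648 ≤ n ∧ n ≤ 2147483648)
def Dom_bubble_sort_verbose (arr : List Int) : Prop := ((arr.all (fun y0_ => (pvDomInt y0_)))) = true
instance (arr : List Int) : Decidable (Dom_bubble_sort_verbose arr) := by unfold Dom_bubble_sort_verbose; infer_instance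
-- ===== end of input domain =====

-- B replaces A's in-place index-swapping nested loops by a per-pass list rebuild that carries the
-- running maximum plus an explicit sorted-suffix accumulator (same bubble-sort statistics, same cost).

-- ===== PORT A =====
-- inner loop body: j-th step of `for j in range(0, n - i - 1)`; state = (result, comparisons, swaps, swapped)
-- indices j, j+1 are always in range here, so pyGetD/pySetD are exact for Python's result[j] / result[j+1]
def pvInnerStep (t : List Int × Int × Int × Bool) (j : Int) : List Int × Int × Int × Bool :=
  let r := t.1
  let c := t.2.1 + 1
  if PySem.List.pyGetD r j 0 > PySem.List.pyGetD r (j + 1) 0 then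
    let a := PySem.List.pyGetD r j 0
    let b := PySem.List.pyGetD r (j + 1) 0
    (PySem.List.pySetD (PySem.List.pySetD r j b) (j + 1) a, c, t.2.2.1 + 1, true)
  else
    (r, c, t.2.2.1, t.2.2.2)

-- outer loop body: pass i of `for i in range(n)`; state = (result, comparisons, swaps, passes, broke)
def pvOuterStep (n : Int) (st : List Int × Int × Int × Int × Bool) (i : Int) :
    List Int × Int × Int × Int × Bool :=
  if st.2.2.2.2 then st    -- `break` already happened: remaining iterations do nothing
  else
    let passes := st.2.2.2.1 + 1
    let inner := (PySem.List.pyRange 0 (n - i - 1) 1).foldl pvInnerStep (st.1, st.2.1, st.2.2.1, false)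
    (inner.1, inner.2.1, inner.2.2.1, passes, !inner.2.2.2)

def bubble_sort_verbose (arr : List Int) : List Int × Int × Int × Int :=
  let n : Int := arr.length
  let st := (PySem.List.pyRange 0 n 1).foldl (pvOuterStep n) (arr, 0, 0, 0, false)
  (st.1, st.2.1, st.2.2.1, st.2.2.2.1)

-- ===== PORT B =====
-- one bubble pass (`_sweep` in Source B), given cur = xs[0] and the rest of xs:
-- rebuild the body carrying the running maximum `cur`; returns (body, carried max, swaps)
def pvSweep (cur : Int) (xs : List Int) : List Int × Int × Int :=
  match xs with
  | [] => ([], cur, 0)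
  | x :: t =>
    if cur > x then
      let r := pvSweep cur t
      (x :: r.1, r.2.1, r.2.2 + 1)
    else
      let r := pvSweep x t
      (cur :: r.1, r.2.1, r.2.2)

-- needed by pvBubbleLoop's termination argument (cited in decreasing_by)
theorem pvSweep_length (cur : Int) (xs : List Int) : (pvSweep cur xs).1.length = xs.length := by
  induction xs generalizing cur with
  | nil => simp [pvSweep]
  | cons x t ih => simp only [pvSweep]; split <;> simp [ih]

-- the `while prefix:` loop of Source B
def pvBubbleLoop (pre done : List Int) (comps swaps passes : Int) : List Int × Int × Int × Int :=
  match pre with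
  | [] => (pre ++ done, comps, swaps, passes)
  | x :: t =>
    let passes := passes + 1
    let comps := comps + ((x :: t).length : Int) - 1
    let r := pvSweep x t
    let swaps := swaps + r.2.2
    if r.2.2 = 0 then ((r.1 ++ [r.2.1]) ++ done, comps, swaps, passes)
    else pvBubbleLoop r.1 (r.2.1 :: done) comps swaps passes
termination_by pre.length
decreasing_by simp [pvSweep_length]

def bubble_sort_verbose_alt (arr : List Int) : List Int × Int × Int × Int :=
  pvBubbleLoop arr [] 0 0 0

-- ===== PRECONDITION & SPEC =====
def Spec_bubble_sort_verbose (arr : List Int) (out : List Int × Int × Int × Int) : Prop := out = bubble_sort_verbose_alt arr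
instance (arr : List Int) (out : List Int × Int × Int × Int) : Decidable (Spec_bubble_sort_verbose arr out) := by unfold Spec_bubble_sort_verbose; infer_instance

-- ===== CLAIM (what is proved, stated in full; the proofs are below) =====
def Claim_equal_bubble_sort_verbose : Prop := ∀ (arr : List Int), Dom_bubble_sort_verbose arr → Spec_bubble_sort_verbose arr (bubble_sort_verbose arr)

-- ===== LEMMAS AND PROOFS =====

theorem pvSweep_nonneg (cur : Int) (xs : List Int) : 0 ≤ (pvSweep cur xs).2.2 := by
  induction xs generalizing cur with
  | nil => simp [pvSweep]
  | cons x t ih => simp only [pvSweep]; split <;> simp <;> [linarith [ih cur]; exact ih x]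

-- once `broke` is set, the remaining outer iterations are the identity
theorem pvOuter_skip (n : Int) (idxs : List Int) (st : List Int × Int × Int × Int × Bool)
    (h : st.2.2.2.2 = true) : idxs.foldl (pvOuterStep n) st = st := by
  induction idxs with
  | nil => rfl
  | cons i is ih => simp [List.foldl_cons, pvOuterStep, h, ih]

theorem pv_getD_append_length (out ys : List Int) (y d : Int) :
    (out ++ y :: ys).getD out.length d = y := by
  simp [List.getD]

theorem pv_getD_append_length_succ (out ys : List Int) (y z d : Int) :
    (out ++ y :: z :: ys).getD (out.length + 1) d = z := by
  simp [List.getD]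

theorem pv_set_append_length (out ys : List Int) (y v : Int) :
    (out ++ y :: ys).set out.length v = out ++ v :: ys := by
  induction out with
  | nil => simp
  | cons o os ih => simp [ih]

theorem pv_set_append_length_succ (out ys : List Int) (y z v : Int) :
    (out ++ y :: z :: ys).set (out.length + 1) v = out ++ y :: v :: ys := by
  induction out with
  | nil => simp
  | cons o os ih => simp [ih]

-- the generalized inner-loop lemma: A's pass over absolute indices [|out|, |out|+|xs|) with current
-- list  out ++ cur :: xs ++ dn  computes exactly B's sweep of cur through xs
theorem pv_inner_gen (xs : List Int) : ∀ (cur : Int) (out dn : List Int) (c s : Int) (flag : Bool),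
    (PySem.List.pyRange (out.length : Int) ((out.length : Int) + xs.length) 1).foldl pvInnerStep
        (out ++ cur :: (xs ++ dn), c, s, flag)
    = (out ++ (pvSweep cur xs).1 ++ (pvSweep cur xs).2.1 :: dn, c + xs.length,
       s + (pvSweep cur xs).2.2, flag || !decide ((pvSweep cur xs).2.2 = 0)) := by
  induction xs with
  | nil =>
    intro cur out dn c s flag
    rw [PySem.List.pyRange_one_eq_nil (by simp)]
    simp [pvSweep]
  | cons x t ih =>
    intro cur out dn c s flag
    have hlt : (out.length : Int) < (out.length : Int) + ((x :: t).length : Int) := by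
      simp only [List.length_cons]; push_cast; omega
    rw [PySem.List.pyRange_one_cons hlt]
    simp only [List.foldl_cons, List.cons_append]
    have cast1 : ((out.length : Int) + 1) = ((out.length + 1 : Nat) : Int) := by push_cast; ring
    have e1 : PySem.List.pyGetD (out ++ cur :: x :: (t ++ dn)) ((out.length : Int)) 0 = cur := by
      rw [PySem.List.pyGetD_natCast]; exact pv_getD_append_length out (x :: (t ++ dn)) cur 0
    have e2 : PySem.List.pyGetD (out ++ cur :: x :: (t ++ dn)) ((out.length : Int) + 1) 0 = x := by
      rw [cast1, PySem.List.pyGetD_natCast]; exact pv_getD_append_length_succ out (t ++ dn) cur x 0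
    by_cases hcx : cur > x
    · have hstep : pvInnerStep (out ++ cur :: x :: (t ++ dn), c, s, flag) ((out.length : Int))
          = (out ++ x :: cur :: (t ++ dn), c + 1, s + 1, true) := by
        simp only [pvInnerStep, e1, e2, if_pos hcx]
        rw [cast1]
        simp only [PySem.List.pySetD_natCast]
        rw [pv_set_append_length out (x :: (t ++ dn)) cur x,
            pv_set_append_length_succ out (t ++ dn) x x cur]
      rw [hstep]
      have hlist : out ++ x :: cur :: (t ++ dn) = (out ++ [x]) ++ cur :: (t ++ dn) := by simp
      have hrange : PySem.List.pyRange ((out.length : Int) + 1)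
            ((out.length : Int) + ((x :: t).length : Int)) 1
          = PySem.List.pyRange (((out ++ [x]).length : Nat) : Int)
            ((((out ++ [x]).length : Nat) : Int) + (t.length : Int)) 1 := by
        congr 1 <;> (push_cast; simp; try ring)
      rw [hlist, hrange, ih cur (out ++ [x]) dn (c + 1) (s + 1) true]
      have hw := pvSweep_nonneg cur t
      have hne : ¬ ((pvSweep cur t).2.2 + 1 = 0) := by omega
      have hne2 : ¬ ((1 : Int) + (pvSweep cur t).2.2 = 0) := by omega
      simp only [pvSweep, if_pos hcx]
      simp only [Prod.mk.injEq, List.append_assoc, List.cons_append, List.singleton_append,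
        List.length_cons, Bool.true_or]
      repeat' apply And.intro
      all_goals first | rfl | (push_cast; ring1) | (rw [eq_comm, decide_eq_false hne2]; simp) | (rw [eq_comm, decide_eq_false hne]; simp) | trivial
    · have hstep : pvInnerStep (out ++ cur :: x :: (t ++ dn), c, s, flag) ((out.length : Int))
          = (out ++ cur :: x :: (t ++ dn), c + 1, s, flag) := by
        simp only [pvInnerStep, e1, e2, if_neg hcx]
      rw [hstep]
      have hlist : out ++ cur :: x :: (t ++ dn) = (out ++ [cur]) ++ x :: (t ++ dn) := by simp
      have hrange : PySem.List.pyRange ((out.length : Int) + 1)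
            ((out.length : Int) + ((x :: t).length : Int)) 1
          = PySem.List.pyRange (((out ++ [cur]).length : Nat) : Int)
            ((((out ++ [cur]).length : Nat) : Int) + (t.length : Int)) 1 := by
        congr 1 <;> (push_cast; simp; try ring)
      rw [hlist, hrange, ih x (out ++ [cur]) dn (c + 1) s flag]
      simp only [pvSweep, if_neg hcx]
      simp only [Prod.mk.injEq, List.append_assoc, List.cons_append,
        List.length_cons]
      repeat' apply And.intro
      all_goals first | rfl | (push_cast; ring1) | trivial

-- proof-side abbreviation: the quadruple A returns from its loop state
def pvExtract (st : List Int × Int × Int × Int × Bool) : List Int × Int × Int × Int :=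
  (st.1, st.2.1, st.2.2.1, st.2.2.2.1)

-- the outer loop from pass i = |done| on, on state  pre ++ done , equals B's loop (by induction
-- on |pre|, which shrinks by one each swapping pass)
theorem pv_outer_aux (k : Nat) : ∀ (pre done : List Int) (c s p : Int), pre.length = k →
    pvExtract
      ((PySem.List.pyRange (done.length : Int) (((pre.length + done.length : Nat) : Int)) 1).foldl
        (pvOuterStep (((pre.length + done.length : Nat) : Int))) (pre ++ done, c, s, p, false))
    = pvBubbleLoop pre done c s p := by
  induction k with
  | zero =>
    intro pre done c s p hk
    cases pre with
    | cons a t => simp at hk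
    | nil =>
      rw [PySem.List.pyRange_one_eq_nil (by simp)]
      simp [pvBubbleLoop, pvExtract]
  | succ k ih =>
    intro pre done c s p hk
    cases pre with
    | nil => simp at hk
    | cons x t =>
      have hkt : t.length = k := by simpa using hk
      have hlt : (done.length : Int) < (((x :: t).length + done.length : Nat) : Int) := by
        simp only [List.length_cons]; push_cast; omega
      rw [PySem.List.pyRange_one_cons hlt]
      simp only [List.foldl_cons]
      have hin := pv_inner_gen t x [] done c s false
      simp only [List.length_nil, Nat.cast_zero, zero_add, List.nil_append, Bool.false_or] at hin
      have hb : (((x :: t).length + done.length : Nat) : Int) - (done.length : Int) - 1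
          = (t.length : Int) := by
        simp only [List.length_cons]; push_cast; ring
      have hstep : pvOuterStep (((x :: t).length + done.length : Nat) : Int)
            ((x :: t) ++ done, c, s, p, false) ((done.length : Int))
          = ((pvSweep x t).1 ++ (pvSweep x t).2.1 :: done, c + (t.length : Int),
             s + (pvSweep x t).2.2, p + 1, !(!decide ((pvSweep x t).2.2 = 0))) := by
        simp only [pvOuterStep, List.cons_append]
        rw [if_neg (by simp)]
        rw [hb, hin]
      rw [hstep]
      simp only [Bool.not_not]
      by_cases hw : (pvSweep x t).2.2 = 0
      · rw [pvOuter_skip _ _ _ (by simp [hw])]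
        simp only [pvBubbleLoop, pvExtract, hw]
        simp only [Prod.mk.injEq, List.append_assoc, List.cons_append,
          List.length_cons, if_pos]
        repeat' apply And.intro
        all_goals first | rfl | (push_cast; ring1) | simp
      · have hflag : decide ((pvSweep x t).2.2 = 0) = false := by simp [hw]
        rw [hflag]
        have ec : c + ((t.length : Nat) : Int) = c + (((x :: t).length : Nat) : Int) - 1 := by
          simp only [List.length_cons]; push_cast; ring
        rw [ec]
        have hlen : (pvSweep x t).1.length = k := by rw [pvSweep_length]; exact hkt
        have e1 : ((done.length : Int) + 1)
            = ((((pvSweep x t).2.1 :: done).length : Nat) : Int) := by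
          simp only [List.length_cons]; push_cast; ring
        have e2 : (((x :: t).length + done.length : Nat) : Int)
            = ((((pvSweep x t).1.length + ((pvSweep x t).2.1 :: done).length : Nat) : Nat) : Int) := by
          simp only [List.length_cons, pvSweep_length]; push_cast; ring
        rw [e1, e2,
          ih (pvSweep x t).1 ((pvSweep x t).2.1 :: done)
            (c + (((x :: t).length : Nat) : Int) - 1) (s + (pvSweep x t).2.2) (p + 1) hlen]
        simp only [pvBubbleLoop]
        rw [if_neg hw]

theorem pv_outer_gen (pre : List Int) : ∀ (done : List Int) (c s p : Int),
    pvExtract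
      ((PySem.List.pyRange (done.length : Int) (((pre.length + done.length : Nat) : Int)) 1).foldl
        (pvOuterStep ((pre.length + done.length : Nat) : Int)) (pre ++ done, c, s, p, false))
    = pvBubbleLoop pre done c s p :=
  fun done c s p => pv_outer_aux pre.length pre done c s p rfl

-- ===== VERDICT (by name: the statement is the Claim_ definition above) =====
theorem bubble_sort_verbose_spec : Claim_equal_bubble_sort_verbose := by
  intro arr _
  unfold Spec_bubble_sort_verbose bubble_sort_verbose bubble_sort_verbose_alt
  have h := pv_outer_gen arr [] 0 0 0
  simpa [pvExtract] using h
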